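-- pv_equiv track=rewrite | github.com/drizztSun/common_project | PythonLeetcode/leetcodeM/1743_RestoretheArrayFromAdjacentPairs.py | doit_dfs
-- ===== SOURCE A (Python) =====
-- def doit_dfs(adjacentPairs: list) -> list:
--     from collections import defaultdict
--
--     def dfs(u):
--         res.append(u)
--         visited[u] = True
--         for v in adj[u]:
--             if not visited[v]:
--                 dfs(v)
--
--     adj = defaultdict(list)
--     for u, v in adjacentPairs:
--         adj[u].append(v)
--         adj[v].append(u)
--
--     edges = [x for x in adj if len(adj[x]) == 1]
--     visited = {x: False for x in adj}
--     res = []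
--     dfs(edges[0])
--
--     return res
-- ===== SOURCE B (Python) =====
-- def doit_dfs(adjacentPairs: list) -> list:
--     from collections import defaultdict
--
--     adj = defaultdict(list)
--     for u, v in adjacentPairs:
--         adj[u].append(v)
--         adj[v].append(u)
--
--     start = next(x for x in adj if len(adj[x]) == 1)
--
--     res = []
--     visited = set()
--     stack = [start]
--     while stack:
--         u = stack.pop()
--         if u in visited:
--             continue
--         visited.add(u)
--         res.append(u)
--         stack.extend(reversed(adj[u]))
--     return res
-- ===== Notes on version B (the rewrite author's own statement) =====
-- stated objective: alternative
-- what changed: Replaces the recursive DFS with its per-node visited dict by an iterative explicit-stack traversal with a visited set (pop, skip visited, push neighbors in reverse), producing the identical chain order without recursion.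
import Mathlib
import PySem

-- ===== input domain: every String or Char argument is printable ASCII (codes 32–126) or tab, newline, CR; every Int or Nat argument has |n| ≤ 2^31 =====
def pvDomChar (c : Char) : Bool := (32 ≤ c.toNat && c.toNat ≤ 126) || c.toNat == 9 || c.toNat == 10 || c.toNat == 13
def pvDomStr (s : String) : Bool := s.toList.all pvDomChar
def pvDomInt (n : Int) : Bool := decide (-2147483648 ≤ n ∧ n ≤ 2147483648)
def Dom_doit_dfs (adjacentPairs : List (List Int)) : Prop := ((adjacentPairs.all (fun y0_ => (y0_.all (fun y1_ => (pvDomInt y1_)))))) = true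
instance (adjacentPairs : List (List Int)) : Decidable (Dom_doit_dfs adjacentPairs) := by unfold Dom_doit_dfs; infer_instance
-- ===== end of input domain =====

-- B replaces A's recursive DFS (recursion + per-node visited dict) by an iterative explicit-stack
-- walk with a visited set; same adjacency map and same degree-1 start node, identical output.

-- ===== PORT A =====
-- shared by both ports, exactly as both Pythons build them:
-- adj = defaultdict(list); for u, v in pairs: adj[u].append(v); adj[v].append(u)
-- (pyGetD .. 0 only matters off-Pre_: Python raises ValueError unpacking a non-pair there)
def buildAdj (adjacentPairs : List (List Int)) : PySem.Dict Int (List Int) :=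
  adjacentPairs.foldl
    (fun d l =>
      let u := PySem.List.pyGetD l 0 0
      let v := PySem.List.pyGetD l 1 0
      (d.modify u [] (· ++ [v])).modify v [] (· ++ [u]))
    PySem.Dict.empty

-- first key of degree 1 (A: edges[0] of the comprehension; B: next(...) over the same keys)
def startOf (adj : PySem.Dict Int (List Int)) : Option Int :=
  (adj.keys.filter (fun x => (adj.getD x []).length == 1)).head?

-- A's recursive dfs with its (res, visited) state; the Nat fuel (threaded through, decreasing by
-- one per dfs call) is only a termination guard: 2*len(pairs) bounds the number of dfs calls,
-- so the fuel-exhaustion branch is never reached on the actual run.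
-- goA is the loop 'for v in adj[u]: if not visited[v]: dfs(v)'; the recursive dfs(v) call is the
-- inlined visit (res.append(v); visited[v]=True) followed by v's own loop.
def goA (adj : PySem.Dict Int (List Int)) (n : Nat) (vs : List Int)
    (st : List Int × PySem.Dict Int Bool) : Nat × (List Int × PySem.Dict Int Bool) :=
  match vs with
  | [] => (n, st)
  | v :: vs' =>
    if st.2.getD v false then goA adj n vs' st
    else
      match n with
      | 0 => (0, st)
      | Nat.succ m =>
        let p := goA adj m (adj.getD v []) (st.1 ++ [v], st.2.insert v true)   -- dfs(v)
        goA adj (min p.1 m) vs' p.2   -- min is a termination device; p.1 ≤ m always (goA_fuel_le)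
termination_by (n, vs.length)
decreasing_by
  · exact Prod.Lex.right n (Nat.lt_succ_self vs'.length)
  · exact Prod.Lex.left _ _ (Nat.lt_succ_self m)
  · exact Prod.Lex.left _ _ (Nat.lt_succ_of_le (Nat.min_le_right p.1 m))

-- dfs(u): append u, mark u visited, then loop over adj[u]
def dfsA (adj : PySem.Dict Int (List Int)) (n : Nat) (u : Int)
    (st : List Int × PySem.Dict Int Bool) : Nat × (List Int × PySem.Dict Int Bool) :=
  goA adj n (adj.getD u []) (st.1 ++ [u], st.2.insert u true)

def doit_dfs (adjacentPairs : List (List Int)) : List Int :=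
  let adj := buildAdj adjacentPairs
  let visited := adj.keys.foldl (fun d x => d.insert x false) (PySem.Dict.empty)
  match startOf adj with
  | none => []   -- Python raises IndexError on edges[0]; excluded by Pre_
  | some s => (dfsA adj (2 * adjacentPairs.length) s ([], visited)).2.1

-- ===== PORT B =====
-- Source B's while-stack loop; the stack is modeled top-at-head, so pop() + extend(reversed(adj[u]))
-- is cons / prepend-adj[u]. Fuel decreases once per node visit; 2*len(pairs)+1 bounds the visits,
-- so the fuel-exhaustion branch is never reached on the actual run.
def runB (adj : PySem.Dict Int (List Int)) (n : Nat) (stack : List Int)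
    (st : List Int × PySem.Set Int) : List Int × PySem.Set Int :=
  match stack with
  | [] => st
  | u :: S =>
    if PySem.Set.contains st.2 u then runB adj n S st
    else
      match n with
      | 0 => st
      | Nat.succ m => runB adj m (adj.getD u [] ++ S) (st.1 ++ [u], PySem.Set.add st.2 u)
termination_by (n, stack.length)
decreasing_by
  · exact Prod.Lex.right n (Nat.lt_succ_self S.length)
  · exact Prod.Lex.left _ _ (Nat.lt_succ_self m)

def doit_dfs_alt (adjacentPairs : List (List Int)) : List Int :=
  let adj := buildAdj adjacentPairs
  match startOf adj with
  | none => []   -- Python raises StopIteration on next(...); excluded by Pre_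
  | some s => (runB adj (2 * adjacentPairs.length + 1) [s] ([], PySem.Set.empty)).1

-- ===== PRECONDITION & SPEC =====
-- Pre_ excludes exactly the inputs where Python A raises: a ValueError unpacking an inner list
-- whose length is not 2, and an IndexError on edges[0] when no node has degree 1.
def Pre_doit_dfs (adjacentPairs : List (List Int)) : Prop :=
  (∀ l ∈ adjacentPairs, l.length = 2) ∧
  ∃ x ∈ adjacentPairs.flatten, adjacentPairs.flatten.count x = 1

instance (adjacentPairs : List (List Int)) : Decidable (Pre_doit_dfs adjacentPairs) := by
  unfold Pre_doit_dfs; infer_instance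

def pvWitness_doit_dfs : List (List Int) := [[1, 2], [2, 3]]

def Spec_doit_dfs (adjacentPairs : List (List Int)) (out : List Int) : Prop := out = doit_dfs_alt adjacentPairs
instance (adjacentPairs : List (List Int)) (out : List Int) : Decidable (Spec_doit_dfs adjacentPairs out) := by unfold Spec_doit_dfs; infer_instance

-- ===== CLAIM (what is proved, stated in full; the proofs are below) =====
def Claim_equal_doit_dfs : Prop := ∀ (adjacentPairs : List (List Int)), Dom_doit_dfs adjacentPairs → Pre_doit_dfs adjacentPairs → Spec_doit_dfs adjacentPairs (doit_dfs adjacentPairs)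

-- ===== LEMMAS AND PROOFS =====

-- the simulation relation: same output list, and A's visited-dict marks the same nodes as B's set
def RelAB (stA : List Int × PySem.Dict Int Bool) (stB : List Int × PySem.Set Int) : Prop :=
  stA.1 = stB.1 ∧ ∀ v : Int, stA.2.getD v false = PySem.Set.contains stB.2 v

-- one-step unfolding lemmas for the two well-founded definitions
theorem goA_nil (adj : PySem.Dict Int (List Int)) (n : Nat) (st : List Int × PySem.Dict Int Bool) :
    goA adj n [] st = (n, st) := by rw [goA.eq_def]

theorem goA_cons_visited (adj : PySem.Dict Int (List Int)) (n : Nat) (v : Int) (vs : List Int)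
    (st : List Int × PySem.Dict Int Bool) (h : st.2.getD v false = true) :
    goA adj n (v :: vs) st = goA adj n vs st := by rw [goA.eq_def]; simp [h]

theorem goA_cons_zero (adj : PySem.Dict Int (List Int)) (v : Int) (vs : List Int)
    (st : List Int × PySem.Dict Int Bool) (h : st.2.getD v false = false) :
    goA adj 0 (v :: vs) st = (0, st) := by rw [goA.eq_def]; simp [h]

theorem goA_cons_succ (adj : PySem.Dict Int (List Int)) (m : Nat) (v : Int) (vs : List Int)
    (st : List Int × PySem.Dict Int Bool) (h : st.2.getD v false = false) :
    goA adj (m + 1) (v :: vs) st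
      = goA adj (min (goA adj m (adj.getD v []) (st.1 ++ [v], st.2.insert v true)).1 m) vs
          (goA adj m (adj.getD v []) (st.1 ++ [v], st.2.insert v true)).2 := by
  rw [goA.eq_def]; simp [h]

theorem runB_nil (adj : PySem.Dict Int (List Int)) (n : Nat) (st : List Int × PySem.Set Int) :
    runB adj n [] st = st := by rw [runB.eq_def]

theorem runB_cons_visited (adj : PySem.Dict Int (List Int)) (n : Nat) (v : Int) (S : List Int)
    (st : List Int × PySem.Set Int) (h : v ∈ st.2) :
    runB adj n (v :: S) st = runB adj n S st := by rw [runB.eq_def]; simp [h]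

theorem runB_cons_zero (adj : PySem.Dict Int (List Int)) (v : Int) (S : List Int)
    (st : List Int × PySem.Set Int) (h : v ∉ st.2) :
    runB adj 0 (v :: S) st = st := by rw [runB.eq_def]; simp [h]

theorem runB_zero (adj : PySem.Dict Int (List Int)) (S : List Int)
    (st : List Int × PySem.Set Int) : runB adj 0 S st = st := by
  induction S with
  | nil => rw [runB_nil]
  | cons u S ih =>
    by_cases h : u ∈ st.2
    · rw [runB_cons_visited adj 0 u S st h]; exact ih
    · rw [runB_cons_zero adj u S st h]

theorem runB_cons_succ (adj : PySem.Dict Int (List Int)) (m : Nat) (v : Int) (S : List Int)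
    (st : List Int × PySem.Set Int) (h : v ∉ st.2) :
    runB adj (m + 1) (v :: S) st
      = runB adj m (adj.getD v [] ++ S) (st.1 ++ [v], PySem.Set.add st.2 v) := by
  rw [runB.eq_def]; simp [h]

theorem rel_mem {stA : List Int × PySem.Dict Int Bool} {stB : List Int × PySem.Set Int}
    (h : RelAB stA stB) (v : Int) : stA.2.getD v false = true ↔ v ∈ stB.2 := by
  rw [h.2 v]; exact PySem.Set.contains_iff _ _

theorem rel_visit {stA : List Int × PySem.Dict Int Bool} {stB : List Int × PySem.Set Int}
    (u : Int) (h : RelAB stA stB) :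
    RelAB (stA.1 ++ [u], stA.2.insert u true) (stB.1 ++ [u], PySem.Set.add stB.2 u) := by
  obtain ⟨h1, h2⟩ := h
  refine ⟨by rw [h1], fun v => ?_⟩
  by_cases hv : v = u
  · subst hv
    simp [PySem.Dict.getD_insert_self, PySem.Set.add_eq_ite]
    split <;> simp_all
  · rw [PySem.Dict.getD_insert, if_neg hv, h2]
    simp [PySem.Set.add_eq_ite]
    split <;> simp [hv]

theorem goA_fuel_le (adj : PySem.Dict Int (List Int)) :
    ∀ n vs st, (goA adj n vs st).1 ≤ n := by
  intro n
  induction n using Nat.strong_induction_on with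
  | _ n ih =>
    intro vs
    induction vs with
    | nil => intro st; rw [goA_nil]
    | cons v vs' ihv =>
      intro st
      cases hc : st.2.getD v false with
      | true => rw [goA_cons_visited adj n v vs' st hc]; exact ihv st
      | false =>
        match n, ih with
        | 0, _ => rw [goA_cons_zero adj v vs' st hc]
        | Nat.succ m, ih =>
          rw [goA_cons_succ adj m v vs' st hc]
          have h1 := ih (min (goA adj m (adj.getD v []) (st.1 ++ [v], st.2.insert v true)).1 m)
            (Nat.lt_succ_of_le (Nat.min_le_right _ _)) vs'
            (goA adj m (adj.getD v []) (st.1 ++ [v], st.2.insert v true)).2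
          exact Nat.le_trans h1 (Nat.le_succ_of_le (Nat.min_le_right _ _))

theorem sim (adj : PySem.Dict Int (List Int)) :
    ∀ n vs S stA stB, RelAB stA stB →
      ∃ stB', RelAB (goA adj n vs stA).2 stB' ∧
        runB adj n (vs ++ S) stB = runB adj (goA adj n vs stA).1 S stB' := by
  intro n
  induction n using Nat.strong_induction_on with
  | _ n ih =>
    intro vs
    induction vs with
    | nil =>
      intro S stA stB hR
      exact ⟨stB, by rw [goA_nil]; exact hR, by rw [goA_nil, List.nil_append]⟩
    | cons v vs' ihv =>
      intro S stA stB hR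
      by_cases hv : stA.2.getD v false = true
      · -- already visited: both sides skip v
        have hvB : v ∈ stB.2 := (rel_mem hR v).mp hv
        obtain ⟨stB', h1, h2⟩ := ihv S stA stB hR
        refine ⟨stB', ?_, ?_⟩
        · rw [goA_cons_visited adj n v vs' stA hv]; exact h1
        · rw [goA_cons_visited adj n v vs' stA hv, List.cons_append,
            runB_cons_visited adj n v (vs' ++ S) stB hvB]
          exact h2
      · have hv' : stA.2.getD v false = false := by
          cases h : stA.2.getD v false
          · rfl
          · exact absurd h hv
        have hvB : v ∉ stB.2 := fun hm => hv ((rel_mem hR v).mpr hm)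
        match n with
        | 0 =>
          refine ⟨stB, ?_, ?_⟩
          · rw [goA_cons_zero adj v vs' stA hv']; exact hR
          · rw [goA_cons_zero adj v vs' stA hv', List.cons_append,
              runB_cons_zero adj v (vs' ++ S) stB hvB, runB_zero]
        | Nat.succ m =>
          -- both sides visit v, then continue in lockstep
          have hRv := rel_visit v hR
          obtain ⟨stB1, hR1, hrun1⟩ :=
            ih m (Nat.lt_succ_self m) (adj.getD v []) (vs' ++ S)
              (stA.1 ++ [v], stA.2.insert v true) (stB.1 ++ [v], PySem.Set.add stB.2 v) hRv
          have hple : (goA adj m (adj.getD v []) (stA.1 ++ [v], stA.2.insert v true)).1 ≤ m :=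
            goA_fuel_le adj m _ _
          obtain ⟨stB2, hR2, hrun2⟩ :=
            ih (goA adj m (adj.getD v []) (stA.1 ++ [v], stA.2.insert v true)).1
              (Nat.lt_succ_of_le hple) vs' S
              (goA adj m (adj.getD v []) (stA.1 ++ [v], stA.2.insert v true)).2 stB1 hR1
          have hgo : goA adj (m + 1) (v :: vs') stA
              = goA adj (goA adj m (adj.getD v []) (stA.1 ++ [v], stA.2.insert v true)).1 vs'
                  (goA adj m (adj.getD v []) (stA.1 ++ [v], stA.2.insert v true)).2 := by
            rw [goA_cons_succ adj m v vs' stA hv', Nat.min_eq_left hple]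
          refine ⟨stB2, ?_, ?_⟩
          · rw [hgo]; exact hR2
          · rw [hgo, List.cons_append, runB_cons_succ adj m v (vs' ++ S) stB hvB,
              hrun1, hrun2]

theorem getD_initFalse : ∀ (ks : List Int) (d : PySem.Dict Int Bool),
    (∀ v, d.getD v false = false) →
    ∀ v, (ks.foldl (fun d x => d.insert x false) d).getD v false = false := by
  intro ks
  induction ks with
  | nil => intro d h v; exact h v
  | cons x ks ih =>
    intro d h v
    simp only [List.foldl_cons]
    refine ih _ (fun w => ?_) v
    rw [PySem.Dict.getD_insert]
    split
    · rfl
    · exact h w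

-- ===== VERDICT (by name: the statement is the Claim_ definition above) =====
theorem doit_dfs_spec : Claim_equal_doit_dfs := by
  intro adjacentPairs _ _
  unfold Spec_doit_dfs doit_dfs doit_dfs_alt
  cases hs : startOf (buildAdj adjacentPairs) with
  | none => simp [hs]
  | some s =>
    simp only [hs]
    set adj := buildAdj adjacentPairs with hadj
    set visited := adj.keys.foldl (fun d x => d.insert x false) PySem.Dict.empty with hvis
    have hR0 : RelAB (([] : List Int) ++ [s], visited.insert s true)
        (([] : List Int) ++ [s], PySem.Set.add PySem.Set.empty s) := by
      refine rel_visit (stA := (([] : List Int), visited))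
        (stB := (([] : List Int), PySem.Set.empty)) s ⟨rfl, fun v => ?_⟩
      rw [hvis, getD_initFalse adj.keys PySem.Dict.empty (fun _ => rfl) v]
      rfl
    obtain ⟨stB', hR, hrun⟩ :=
      sim adj (2 * adjacentPairs.length) (adj.getD s []) []
        (([] : List Int) ++ [s], visited.insert s true)
        (([] : List Int) ++ [s], PySem.Set.add PySem.Set.empty s) hR0
    have hB : runB adj (2 * adjacentPairs.length + 1) [s] ([], PySem.Set.empty)
        = runB adj (2 * adjacentPairs.length) (adj.getD s [] ++ [])
          (([] : List Int) ++ [s], PySem.Set.add PySem.Set.empty s) := by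
      rw [runB_cons_succ adj (2 * adjacentPairs.length) s [] ([], PySem.Set.empty)
        (by simp [PySem.Set.empty])]
    simp only [dfsA]
    rw [hB, hrun, runB_nil]
    exact hR.1
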